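-- pv_equiv track=rewrite | github.com/ilnar1995/sql_test_task | python_task_1.py | sersh_spetial_number
-- ===== SOURCE A (Python) =====
-- def numb(num, k=1, n=4):
--     result = []
--     tokens = ['0', '1', '2', '3', '4', '5', '6', '7', '8', '9']
--     kol = 0
--     for element in num[::k]:
--         kol+=1
--         if kol > n or element not in tokens:
--             break
--         if k == -1:
--             result = [element] + result
--         else:
--             result.append(element)
--     return result
--
-- def convert(numbers):
--     n1 = numb(num=numbers[0], k=-1, n=4)
--     n2 = numb(num=numbers[1], k=1, n=5)
--     if n1 and n2:
--         return '{:04}'.format(int(''.join(n1)))+'\\'+'{:05}'.format(int(''.join(n2)))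
--     else:
--         return None
--
-- def sersh_spetial_number(arr):
--     lst = arr.split(' ')
--     new = []
--     for s in lst:
--         if s.count('\\') == 1:
--             numbers = s.split('\\')
--             aaaa = convert(numbers)
--             if aaaa:
--                 new.append(aaaa)
--     return new
-- ===== SOURCE B (Python) =====
-- def sersh_spetial_number(arr):
--     out = []
--     for tok in arr.split(' '):
--         if tok.count('\\') == 1:
--             parts = tok.split('\\')
--             left, right = parts[0], parts[1]
--             n = len(left)
--             i = 0
--             while i < 4 and i < n and left[n - 1 - i].isdigit():
--                 i += 1
--             m = len(right)
--             j = 0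
--             while j < 5 and j < m and right[j].isdigit():
--                 j += 1
--             if i and j:
--                 out.append('{:04}\\{:05}'.format(int(left[n - i:]), int(right[:j])))
--     return out
-- ===== Notes on version B (the rewrite author's own statement) =====
-- stated objective: simpler
-- what changed: A's three helpers (a generic numb loop over num[::k] collecting a character list with prepend/append, joined and int-formatted twice via convert) are collapsed into one function that locates each digit run with a plain capped index scan (no list building, slicing-by-step, reversal or join) and formats once.
import Mathlib
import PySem

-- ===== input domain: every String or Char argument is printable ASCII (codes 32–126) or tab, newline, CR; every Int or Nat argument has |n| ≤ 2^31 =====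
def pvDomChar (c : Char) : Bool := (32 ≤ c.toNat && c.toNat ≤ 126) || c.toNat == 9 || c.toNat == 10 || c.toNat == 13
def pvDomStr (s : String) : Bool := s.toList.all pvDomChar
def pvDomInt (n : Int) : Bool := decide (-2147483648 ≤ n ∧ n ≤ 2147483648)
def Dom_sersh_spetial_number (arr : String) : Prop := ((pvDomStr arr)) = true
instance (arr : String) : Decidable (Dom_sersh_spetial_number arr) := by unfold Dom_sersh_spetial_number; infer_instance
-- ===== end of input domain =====

-- B replaces A's three helpers (per-character list building, reversal, join, separate formats)
-- by one function that locates the two digit runs with plain index scans and formats once (objective: simpler).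

-- ===== PORT A =====

-- tokens = ['0', …, '9']
def pvTokens : List Char := ['0', '1', '2', '3', '4', '5', '6', '7', '8', '9']

-- the for-loop of numb: kol counter, break via returning result; prepend when k == -1, append otherwise
def pvNumbLoop (k n : Int) : List Char → Int → List Char → List Char
  | [], _, result => result
  | e :: rest, kol, result =>
    let kol' := kol + 1
    if kol' > n ∨ ¬ (pvTokens.contains e = true) then result
    else if k = -1 then pvNumbLoop k n rest kol' (e :: result)
    else pvNumbLoop k n rest kol' (result ++ [e])

-- numb(num, k, n); num[::k] is slice?; A only calls k = ±1, so the slice is never none (getD [] unreachable)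
def pvNumb (num : List Char) (k : Int) (n : Int) : List Char :=
  pvNumbLoop k n ((PySem.List.slice? num none none k).getD []) 0 []

-- convert(numbers); numbers[0]/numbers[1] are in range at every call site (count('\\')==1 gives 2 parts);
-- ''.join(n1) of a list of chars is n1 itself; int() on the nonempty digit run cannot fail (getD 0 unreachable);
-- '{:04}'.format(v) on an int is exactly str(v) zero-filled to width 4 (sign kept in front), i.e. zfill (toChars v) 4
def pvConvert (numbers : List (List Char)) : Option (List Char) :=
  let n1 := pvNumb ((PySem.List.pyGet? numbers 0).getD []) (-1) 4
  let n2 := pvNumb ((PySem.List.pyGet? numbers 1).getD []) 1 5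
  if n1 ≠ [] ∧ n2 ≠ [] then
    some (PySem.Chars.zfill (PySem.Int.toChars ((PySem.Int.ofChars? n1).getD 0)) 4
          ++ '\\' :: PySem.Chars.zfill (PySem.Int.toChars ((PySem.Int.ofChars? n2).getD 0)) 5)
  else none

def sersh_spetial_number (arr : String) : List String :=
  (PySem.Chars.splitOn arr.toList [' ']).foldl (fun new s =>
    if PySem.Chars.count s ['\\'] = 1 then
      match pvConvert (PySem.Chars.splitOn s ['\\']) with
      | some aaaa => if aaaa.isEmpty then new else new ++ [String.ofList aaaa]  -- 'if aaaa:' = nonempty-string truthiness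
      | none => new
    else new) []

-- ===== PORT B =====

-- while i < 4 and i < n and left[n-1-i].isdigit(): i += 1   (the index n-1-i is in range: i < n)
def pvTailCnt (left : List Char) (i : Nat) : Nat :=
  if h : i < 4 ∧ i < left.length ∧ PySem.Chars.isdigit (left.getD (left.length - 1 - i) ' ') = true then
    pvTailCnt left (i + 1)
  else i
  termination_by 4 - i
  decreasing_by omega

-- while j < 5 and j < m and right[j].isdigit(): j += 1
def pvHeadCnt (right : List Char) (j : Nat) : Nat :=
  if h : j < 5 ∧ j < right.length ∧ PySem.Chars.isdigit (right.getD j ' ') = true then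
    pvHeadCnt right (j + 1)
  else j
  termination_by 5 - j
  decreasing_by omega

-- '{:04}\\{:05}'.format(x, y) = zfill (str x) 4 ++ '\' :: zfill (str y) 5; int() on the nonempty digit runs
-- cannot fail (getD 0 unreachable); parts[0]/parts[1] are in range (count('\\')==1 gives 2 parts)
def sersh_spetial_number_alt (arr : String) : List String :=
  (PySem.Chars.splitOn arr.toList [' ']).foldl (fun out tok =>
    if PySem.Chars.count tok ['\\'] = 1 then
      let parts := PySem.Chars.splitOn tok ['\\']
      let left := (PySem.List.pyGet? parts 0).getD []
      let right := (PySem.List.pyGet? parts 1).getD []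
      let i := pvTailCnt left 0
      let j := pvHeadCnt right 0
      if i ≠ 0 ∧ j ≠ 0 then
        out ++ [String.ofList (PySem.Chars.zfill (PySem.Int.toChars ((PySem.Int.ofChars? (left.drop (left.length - i))).getD 0)) 4
                ++ '\\' :: PySem.Chars.zfill (PySem.Int.toChars ((PySem.Int.ofChars? (right.take j)).getD 0)) 5)]
      else out
    else out) []

-- ===== PRECONDITION & SPEC =====
def Spec_sersh_spetial_number (arr : String) (out : List String) : Prop := out = sersh_spetial_number_alt arr
instance (arr : String) (out : List String) : Decidable (Spec_sersh_spetial_number arr out) := by unfold Spec_sersh_spetial_number; infer_instance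

-- ===== CLAIM (what is proved, stated in full; the proofs are below) =====
def Claim_equal_sersh_spetial_number : Prop := ∀ (arr : String), Dom_sersh_spetial_number arr → Spec_sersh_spetial_number arr (sersh_spetial_number arr)

-- ===== LEMMAS AND PROOFS =====

-- A's membership test in tokens = ['0'..'9'] is exactly isdigit
theorem pv_contains_eq_isdigit (c : Char) : pvTokens.contains c = PySem.Chars.isdigit c := by
  rw [Bool.eq_iff_iff]
  simp only [pvTokens, PySem.Chars.isdigit, List.contains_eq_mem, List.mem_cons, List.not_mem_nil,
    or_false, decide_eq_true_eq, Bool.and_eq_true, Char.ext_iff, Char.le_def,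
    UInt32.le_iff_toNat_le, UInt32.ext_iff]
  have e0 : ('0':Char).val.toNat = 48 := rfl
  have e1 : ('1':Char).val.toNat = 49 := rfl
  have e2 : ('2':Char).val.toNat = 50 := rfl
  have e3 : ('3':Char).val.toNat = 51 := rfl
  have e4 : ('4':Char).val.toNat = 52 := rfl
  have e5 : ('5':Char).val.toNat = 53 := rfl
  have e6 : ('6':Char).val.toNat = 54 := rfl
  have e7 : ('7':Char).val.toNat = 55 := rfl
  have e8 : ('8':Char).val.toNat = 56 := rfl
  have e9 : ('9':Char).val.toNat = 57 := rfl
  omega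

-- xs[i]? indexing over range |xs| reproduces xs
theorem pv_filterMap_range (l : List Char) :
    List.filterMap (fun x => l[x]?) (List.range l.length) = l := by
  induction l with
  | nil => simp
  | cons a t ih =>
    rw [List.length_cons, List.range_succ_eq_map, List.filterMap_cons, List.filterMap_map]
    simpa using ih

-- num[::1] = num
theorem pv_slice_one (num : List Char) : (PySem.List.slice? num none none 1).getD [] = num := by
  simp [PySem.List.slice?, PySem.List.sliceIndices]
  split
  · exact pv_filterMap_range num
  · rename_i h; simp at h; simp [h]

-- A's forward loop collects (takeWhile isdigit).take (n - kol)
theorem pv_numbLoop_one (n : Int) (cs : List Char) : ∀ (kol : Int) (acc : List Char),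
    pvNumbLoop 1 n cs kol acc = acc ++ (cs.takeWhile PySem.Chars.isdigit).take (n - kol).toNat := by
  induction cs with
  | nil => intro kol acc; simp [pvNumbLoop]
  | cons e rest ih =>
    intro kol acc
    rw [pvNumbLoop]
    simp only [pv_contains_eq_isdigit]
    by_cases h1 : kol + 1 > n
    · have : (n - kol).toNat = 0 := by omega
      simp [h1, this]
    · by_cases h2 : PySem.Chars.isdigit e
      · simp only [h1, h2, not_true, or_false, if_false, if_neg (by norm_num : ¬(1:Int) = -1)]
        rw [ih]
        rw [List.takeWhile_cons_of_pos h2]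
        have : (n - kol).toNat = (n - (kol+1)).toNat + 1 := by omega
        rw [this, List.take_succ_cons, List.append_assoc]
        rfl
      · simp [h1, h2, List.takeWhile_cons_of_neg]

-- A's backward loop collects the reverse of the same prefix of its (already reversed) input
theorem pv_numbLoop_neg (n : Int) (cs : List Char) : ∀ (kol : Int) (acc : List Char),
    pvNumbLoop (-1) n cs kol acc = ((cs.takeWhile PySem.Chars.isdigit).take (n - kol).toNat).reverse ++ acc := by
  induction cs with
  | nil => intro kol acc; simp [pvNumbLoop]
  | cons e rest ih =>
    intro kol acc
    rw [pvNumbLoop]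
    simp only [pv_contains_eq_isdigit]
    by_cases h1 : kol + 1 > n
    · have : (n - kol).toNat = 0 := by omega
      simp [h1, this]
    · by_cases h2 : PySem.Chars.isdigit e
      · simp only [h1, h2, not_true, or_false, if_false]
        rw [ih]
        rw [List.takeWhile_cons_of_pos h2]
        have : (n - kol).toNat = (n - (kol+1)).toNat + 1 := by omega
        rw [this, List.take_succ_cons, List.reverse_cons, List.append_assoc]
        rfl
      · simp [h1, h2, List.takeWhile_cons_of_neg]

-- B's head scan counts min cap (length of the digit prefix)
theorem pv_headCnt_eq (right : List Char) : ∀ (j : Nat),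
    pvHeadCnt right j = j + min (5 - j) (((right.drop j).takeWhile PySem.Chars.isdigit).length) := by
  intro j
  fun_induction pvHeadCnt right j with
  | case1 j h ih =>
    obtain ⟨h5, hlen, hd⟩ := h
    rw [ih]
    rw [List.getD_eq_getElem _ _ hlen] at hd
    rw [List.drop_eq_getElem_cons hlen, List.takeWhile_cons_of_pos hd]
    simp only [List.length_cons]
    omega
  | case2 j h =>
    push Not at h
    by_cases h5 : j < 5
    · by_cases hlen : j < right.length
      · have hd := h h5 hlen
        rw [List.getD_eq_getElem _ _ hlen] at hd
        rw [List.drop_eq_getElem_cons hlen, List.takeWhile_cons_of_neg (by simpa using hd)]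
        simp
      · rw [List.drop_of_length_le (by omega)]
        simp
    · omega

-- B's tail scan is the head scan of the reversed list, cap 4
theorem pv_tailCnt_eq (left : List Char) : ∀ (i : Nat),
    pvTailCnt left i = i + min (4 - i) (((left.reverse.drop i).takeWhile PySem.Chars.isdigit).length) := by
  intro i
  fun_induction pvTailCnt left i with
  | case1 i h ih =>
    obtain ⟨h4, hlen, hd⟩ := h
    rw [ih]
    have hlen' : i < left.reverse.length := by simpa using hlen
    rw [List.getD_eq_getElem _ _ (by omega), ← List.getElem_reverse (by simpa using hlen)] at hd
    rw [List.drop_eq_getElem_cons hlen', List.takeWhile_cons_of_pos hd]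
    simp only [List.length_cons]
    omega
  | case2 i h =>
    push Not at h
    by_cases h4 : i < 4
    · by_cases hlen : i < left.length
      · have hd := h h4 hlen
        have hlen' : i < left.reverse.length := by simpa using hlen
        rw [List.getD_eq_getElem _ _ (by omega), ← List.getElem_reverse (by simpa using hlen)] at hd
        rw [List.drop_eq_getElem_cons hlen', List.takeWhile_cons_of_neg (by simpa using hd)]
        simp
      · rw [List.drop_of_length_le (by simpa using hlen)]
        simp
    · omega

-- taking min k |takeWhile| from the list = taking k from the takeWhile prefix
theorem pv_take_min (p : Char → Bool) (l : List Char) (k : Nat) :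
    l.take (min k (l.takeWhile p).length) = (l.takeWhile p).take k := by
  have hsplit : l.takeWhile p ++ l.dropWhile p = l := List.takeWhile_append_dropWhile
  calc l.take (min k (l.takeWhile p).length)
      = (l.takeWhile p ++ l.dropWhile p).take (min k (l.takeWhile p).length) := by rw [hsplit]
    _ = (l.takeWhile p).take (min k (l.takeWhile p).length) :=
        List.take_append_of_le_length (by omega)
    _ = (l.takeWhile p).take k := by
        rw [← List.take_take, List.take_length]

-- the two per-token step functions agree
theorem pv_step_eq (new : List String) (s : List Char) :
    (if PySem.Chars.count s ['\\'] = 1 then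
      match pvConvert (PySem.Chars.splitOn s ['\\']) with
      | some aaaa => if aaaa.isEmpty then new else new ++ [String.ofList aaaa]
      | none => new
    else new) =
    (if PySem.Chars.count s ['\\'] = 1 then
      let parts := PySem.Chars.splitOn s ['\\']
      let left := (PySem.List.pyGet? parts 0).getD []
      let right := (PySem.List.pyGet? parts 1).getD []
      let i := pvTailCnt left 0
      let j := pvHeadCnt right 0
      if i ≠ 0 ∧ j ≠ 0 then
        new ++ [String.ofList (PySem.Chars.zfill (PySem.Int.toChars ((PySem.Int.ofChars? (left.drop (left.length - i))).getD 0)) 4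
                ++ '\\' :: PySem.Chars.zfill (PySem.Int.toChars ((PySem.Int.ofChars? (right.take j)).getD 0)) 5)]
      else new
    else new) := by
  by_cases hc : PySem.Chars.count s ['\\'] = 1
  · simp only [hc, if_pos]
    set parts := PySem.Chars.splitOn s ['\\'] with hparts
    set left := (PySem.List.pyGet? parts 0).getD [] with hleft
    set right := (PySem.List.pyGet? parts 1).getD [] with hright
    have hn1 : pvNumb left (-1) 4 = ((left.reverse.takeWhile PySem.Chars.isdigit).take 4).reverse := by
      rw [pvNumb, PySem.List.slice?_none_none_neg_one, Option.getD_some, pv_numbLoop_neg]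
      norm_num
      rfl
    have hn2 : pvNumb right 1 5 = (right.takeWhile PySem.Chars.isdigit).take 5 := by
      rw [pvNumb, pv_slice_one, pv_numbLoop_one]
      norm_num
      rfl
    have hi : pvTailCnt left 0 = min 4 (left.reverse.takeWhile PySem.Chars.isdigit).length := by
      rw [pv_tailCnt_eq]; simp
    have hj : pvHeadCnt right 0 = min 5 (right.takeWhile PySem.Chars.isdigit).length := by
      rw [pv_headCnt_eq]; simp
    have hdrop : left.drop (left.length - pvTailCnt left 0)
        = ((left.reverse.takeWhile PySem.Chars.isdigit).take 4).reverse := by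
      rw [hi, ← pv_take_min PySem.Chars.isdigit left.reverse 4, List.take_reverse]
      simp
    have htake : right.take (pvHeadCnt right 0) = (right.takeWhile PySem.Chars.isdigit).take 5 := by
      rw [hj, pv_take_min]
    have hlen1 : (pvNumb left (-1) 4).length = pvTailCnt left 0 := by
      rw [hn1, hi]; simp
    have hlen2 : (pvNumb right 1 5).length = pvHeadCnt right 0 := by
      rw [hn2, hj]; simp
    rw [pvConvert]
    by_cases hcond : pvNumb left (-1) 4 ≠ [] ∧ pvNumb right 1 5 ≠ []
    · rw [if_pos hcond]
      have hcond' : pvTailCnt left 0 ≠ 0 ∧ pvHeadCnt right 0 ≠ 0 := by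
        constructor
        · rw [← hlen1]; simpa [List.length_eq_zero_iff] using hcond.1
        · rw [← hlen2]; simpa [List.length_eq_zero_iff] using hcond.2
      simp only [if_pos hcond']
      rw [hdrop, htake, ← hn1, ← hn2]
      simp [List.isEmpty_iff]
      rfl
    · rw [if_neg hcond]
      have hcond' : ¬ (pvTailCnt left 0 ≠ 0 ∧ pvHeadCnt right 0 ≠ 0) := by
        rw [← hlen1, ← hlen2]
        simpa [List.length_eq_zero_iff] using hcond
      simp only [if_neg hcond']
  · simp only [hc, if_false]

-- ===== VERDICT (by name: the statement is the Claim_ definition above) =====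
theorem sersh_spetial_number_spec : Claim_equal_sersh_spetial_number := by
  intro arr _
  unfold Spec_sersh_spetial_number sersh_spetial_number sersh_spetial_number_alt
  exact congrFun (congrFun (congrArg List.foldl (funext fun new => funext fun s => pv_step_eq new s)) []) _
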